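-- pv_equiv track=rewrite | github.com/41490/chao5whistler | src/musikalisches/tools/validate_stage7_ffmpeg_toolchain.py | parse_protocols
-- ===== SOURCE A (Python) =====
-- def parse_protocols(output: str) -> dict[str, set[str]]:
--     sections = {"Input": set(), "Output": set()}
--     current: str | None = None
--     for raw_line in output.splitlines():
--         line = raw_line.strip()
--         if line == "Input:":
--             current = "Input"
--             continue
--         if line == "Output:":
--             current = "Output"
--             continue
--         if not line or current is None or line.endswith(":"):
--             continue
--         sections[current].add(line)
--     return sections
-- ===== SOURCE B (Python) =====
-- def _is_marker(line):
--     return line == "Input:" or line == "Output:"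
--
--
-- def _take_body(lines):
--     body = []
--     for line in lines:
--         if _is_marker(line):
--             break
--         body.append(line)
--     return body
--
--
-- def _drop_to_marker(lines):
--     i = 0
--     while i < len(lines) and not _is_marker(lines[i]):
--         i += 1
--     return lines[i:]
--
--
-- def parse_protocols(output: str) -> dict[str, set[str]]:
--     sections = {"Input": set(), "Output": set()}
--     lines = [raw.strip() for raw in output.splitlines()]
--     rest = _drop_to_marker(lines)
--     while rest:
--         name = "Input" if rest[0] == "Input:" else "Output"
--         body = _take_body(rest[1:])
--         for line in body:
--             if line and not line.endswith(":"):
--                 sections[name].add(line)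
--         rest = _drop_to_marker(rest[1:])
--     return sections
-- ===== Notes on version B (the rewrite author's own statement) =====
-- stated objective: alternative
-- what changed: Replaces A's single stateful loop with a 'current' section variable by a chunking decomposition: strip all lines once, skip to the first marker, then repeatedly take the marker-free body slice after each 'Input:'/'Output:' header and add its non-empty non-':'-terminated lines to that header's set.
import Mathlib
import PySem

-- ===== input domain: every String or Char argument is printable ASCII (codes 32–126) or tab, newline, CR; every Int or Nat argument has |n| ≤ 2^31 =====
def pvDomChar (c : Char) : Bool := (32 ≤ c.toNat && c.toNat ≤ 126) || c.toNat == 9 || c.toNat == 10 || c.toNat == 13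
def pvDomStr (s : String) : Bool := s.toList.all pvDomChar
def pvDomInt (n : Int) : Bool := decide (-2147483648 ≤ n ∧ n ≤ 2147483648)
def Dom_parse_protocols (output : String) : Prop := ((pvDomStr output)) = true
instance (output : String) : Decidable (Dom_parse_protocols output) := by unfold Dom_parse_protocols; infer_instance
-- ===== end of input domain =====

-- B replaces A's single stateful loop (a `current` variable) by a chunking pass:
-- strip all lines, skip to the first 'Input:'/'Output:' marker, then repeatedly
-- take the marker-free body after each marker and add its eligible lines to that
-- marker's set (objective: alternative decomposition, same cost).

-- ===== PORT A =====
-- loop body of A, applied to the already-stripped line (A computes line = raw.strip() first)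
def parseStepA (st : PySem.Dict String (PySem.Set String) × Option String) (line : String) :
    PySem.Dict String (PySem.Set String) × Option String :=
  if line = "Input:" then (st.1, some "Input")
  else if line = "Output:" then (st.1, some "Output")
  else if line = "" then st
  else match st.2 with
    | none => st
    | some cur =>
        if PySem.Str.endswith line ":" then st
        else (st.1.modify cur [] (fun s => PySem.Set.add s line), st.2)

def parse_protocols (output : String) : List (String × List String) :=
  let sections : PySem.Dict String (PySem.Set String) :=
    (PySem.Dict.empty.insert "Input" PySem.Set.empty).insert "Output" PySem.Set.empty
  let final := (PySem.Str.splitlines output).foldl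
    (fun st raw => parseStepA st (PySem.Str.strip raw)) (sections, none)
  final.1.items

-- ===== PORT B =====
def isMarker (line : String) : Bool := line = "Input:" || line = "Output:"

-- _take_body: the prefix of lines before the first marker
def takeBody (lines : List String) : List String := lines.takeWhile (fun l => !isMarker l)

-- _drop_to_marker: lines from the first marker on
def dropToMarker (lines : List String) : List String := lines.dropWhile (fun l => !isMarker l)

-- adds the eligible lines of one section body to sections[name]
def addBody (d : PySem.Dict String (PySem.Set String)) (name : String) (body : List String) :
    PySem.Dict String (PySem.Set String) :=
  body.foldl (fun d line =>
    if line ≠ "" && !PySem.Str.endswith line ":" then d.modify name [] (fun s => PySem.Set.add s line)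
    else d) d

-- the while loop of B; fuel bounds the iteration count (rest only shrinks)
def runOuter (fuel : Nat) (d : PySem.Dict String (PySem.Set String)) (rest : List String) :
    PySem.Dict String (PySem.Set String) :=
  match fuel, rest with
  | 0, _ => d
  | _ + 1, [] => d
  | f + 1, m :: tl =>
      let name := if m = "Input:" then "Input" else "Output"
      runOuter f (addBody d name (takeBody tl)) (dropToMarker tl)

def parse_protocols_alt (output : String) : List (String × List String) :=
  let sections : PySem.Dict String (PySem.Set String) :=
    (PySem.Dict.empty.insert "Input" PySem.Set.empty).insert "Output" PySem.Set.empty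
  let lines := (PySem.Str.splitlines output).map PySem.Str.strip
  (runOuter lines.length sections (dropToMarker lines)).items

-- ===== PRECONDITION & SPEC =====
def Spec_parse_protocols (output : String) (out : List (String × List String)) : Prop := out = parse_protocols_alt output
instance (output : String) (out : List (String × List String)) : Decidable (Spec_parse_protocols output out) := by unfold Spec_parse_protocols; infer_instance

-- ===== CLAIM (what is proved, stated in full; the proofs are below) =====
def Claim_equal_parse_protocols : Prop := ∀ (output : String), Dom_parse_protocols output → Spec_parse_protocols output (parse_protocols output)

-- ===== LEMMAS AND PROOFS =====

theorem length_dropToMarker_le (L : List String) : (dropToMarker L).length ≤ L.length := by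
  simpa [dropToMarker] using List.length_dropWhile_le (fun l => !isMarker l) L

-- folding A's step with current = some name processes the body into `name`,
-- then continues at the next marker
theorem foldA_some (L : List String) : ∀ (d : PySem.Dict String (PySem.Set String))
    (name : String) (fuel : Nat), (dropToMarker L).length ≤ fuel →
    (L.foldl parseStepA (d, some name)).1 = runOuter fuel (addBody d name (takeBody L)) (dropToMarker L) := by
  induction L with
  | nil =>
      intro d name fuel _
      cases fuel <;> simp [takeBody, dropToMarker, addBody, runOuter]
  | cons l tl ih =>
      intro d name fuel hf
      by_cases hm : isMarker l = true
      · have hd : dropToMarker (l :: tl) = l :: tl := by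
          simp [dropToMarker, hm]
        rw [hd] at hf ⊢
        obtain ⟨f, rfl⟩ : ∃ f, fuel = f + 1 := by
          cases fuel with
          | zero => simp at hf
          | succ f => exact ⟨f, rfl⟩
        have hfl : (dropToMarker tl).length ≤ f := by
          have := length_dropToMarker_le tl
          simp at hf; omega
        have hname : parseStepA (d, some name) l
            = (d, some (if l = "Input:" then "Input" else "Output")) := by
          simp only [isMarker, Bool.or_eq_true, decide_eq_true_eq] at hm
          rcases hm with h | h <;> simp [parseStepA, h]
        have hb : takeBody (l :: tl) = [] := by
          simp [takeBody, hm]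
        rw [runOuter]
        simp only [List.foldl_cons, hname]
        rw [ih _ _ f hfl]
        simp [addBody, hb]
      · have hd : dropToMarker (l :: tl) = dropToMarker tl := by
          simp [dropToMarker, hm]
        have hb : takeBody (l :: tl) = l :: takeBody tl := by
          simp [takeBody, hm]
        have hstep : parseStepA (d, some name) l
            = (if l ≠ "" && !PySem.Str.endswith l ":" then
                 d.modify name [] (fun s => PySem.Set.add s l) else d, some name) := by
          simp only [isMarker, Bool.or_eq_true, decide_eq_true_eq, not_or] at hm
          by_cases he : l = ""
          · simp [parseStepA, he]
          · cases hc : PySem.Chars.endswith l.toList [':'] <;>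
              simp [parseStepA, hm.1, hm.2, he, hc]
        rw [hd] at hf ⊢
        simp only [List.foldl_cons, hstep]
        rw [ih _ _ fuel hf, hb]
        simp [addBody]

-- folding A's step with current = None ignores everything before the first marker
theorem foldA_none (L : List String) : ∀ (d : PySem.Dict String (PySem.Set String))
    (fuel : Nat), (dropToMarker L).length ≤ fuel →
    (L.foldl parseStepA (d, none)).1 = runOuter fuel d (dropToMarker L) := by
  induction L with
  | nil => intro d fuel _; cases fuel <;> simp [dropToMarker, runOuter]
  | cons l tl ih =>
      intro d fuel hf
      by_cases hm : isMarker l = true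
      · have hd : dropToMarker (l :: tl) = l :: tl := by
          simp [dropToMarker, hm]
        rw [hd] at hf ⊢
        obtain ⟨f, rfl⟩ : ∃ f, fuel = f + 1 := by
          cases fuel with
          | zero => simp at hf
          | succ f => exact ⟨f, rfl⟩
        have hfl : (dropToMarker tl).length ≤ f := by
          have := length_dropToMarker_le tl
          simp at hf; omega
        have hname : parseStepA (d, none) l
            = (d, some (if l = "Input:" then "Input" else "Output")) := by
          simp only [isMarker, Bool.or_eq_true, decide_eq_true_eq] at hm
          rcases hm with h | h <;> simp [parseStepA, h]
        rw [runOuter]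
        simp only [List.foldl_cons, hname]
        exact foldA_some tl d _ f hfl
      · have hd : dropToMarker (l :: tl) = dropToMarker tl := by
          simp [dropToMarker, hm]
        have hstep : parseStepA (d, none) l = (d, none) := by
          simp only [isMarker, Bool.or_eq_true, decide_eq_true_eq, not_or] at hm
          by_cases he : l = "" <;> simp [parseStepA, hm.1, hm.2, he]
        rw [hd] at hf ⊢
        simp only [List.foldl_cons, hstep]
        exact ih d fuel hf

-- ===== VERDICT (by name: the statement is the Claim_ definition above) =====
theorem parse_protocols_spec : Claim_equal_parse_protocols := by
  intro output _
  unfold Spec_parse_protocols parse_protocols parse_protocols_alt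
  have hfold : (PySem.Str.splitlines output).foldl
      (fun st raw => parseStepA st (PySem.Str.strip raw))
      ((PySem.Dict.empty.insert "Input" PySem.Set.empty).insert "Output" PySem.Set.empty, none)
      = ((PySem.Str.splitlines output).map PySem.Str.strip).foldl parseStepA
      ((PySem.Dict.empty.insert "Input" PySem.Set.empty).insert "Output" PySem.Set.empty, none) := by
    rw [List.foldl_map]
  simp only [hfold]
  congr 1
  exact foldA_none _ _ _ (le_trans (length_dropToMarker_le _) (by simp))
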